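-- pv_equiv track=rewrite | github.com/mschemmel/finder | motifs.py | degenerated_of
-- ===== SOURCE A (Python) =====
-- def degenerated_of(deg):
--     transform = deg
--
--     # https://www.bioinformatics.org/sms/iupac.html
--     dg = {"R": "AG",
--           "Y": "CT",
--           "S": "GC",
--           "W": "AT",
--           "K": "GT",
--           "M": "AC",
--           "B": "CGT",
--           "D": "AGT",
--           "H": "ACT",
--           "V": "ACG",
--           "N": "ATGC"}
--
--     # detect all non nucleotides in sequence
--     non_nucleotides = list(filter(lambda a :  True if a in list(dg.keys()) else False, transform))
--
--     # replace them with possible nucleotides as regex notation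
--     for flse in non_nucleotides:
--         transform = transform.replace(flse,"[{}]".format(dg[flse]))
--
--     return transform
-- ===== SOURCE B (Python) =====
-- def degenerated_of(deg):
--     # https://www.bioinformatics.org/sms/iupac.html
--     dg = {"R": "AG",
--           "Y": "CT",
--           "S": "GC",
--           "W": "AT",
--           "K": "GT",
--           "M": "AC",
--           "B": "CGT",
--           "D": "AGT",
--           "H": "ACT",
--           "V": "ACG",
--           "N": "ATGC"}
--     # single left-to-right pass: expand each degenerate code in place
--     return "".join("[{}]".format(dg[c]) if c in dg else c for c in deg)
-- ===== Notes on version B (the rewrite author's own statement) =====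
-- stated objective: faster
-- what changed: Replaces A's filter pass plus one global str.replace pass over the whole string per degenerate occurrence with a single left-to-right scan that expands each character directly into the joined output.
import Mathlib
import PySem

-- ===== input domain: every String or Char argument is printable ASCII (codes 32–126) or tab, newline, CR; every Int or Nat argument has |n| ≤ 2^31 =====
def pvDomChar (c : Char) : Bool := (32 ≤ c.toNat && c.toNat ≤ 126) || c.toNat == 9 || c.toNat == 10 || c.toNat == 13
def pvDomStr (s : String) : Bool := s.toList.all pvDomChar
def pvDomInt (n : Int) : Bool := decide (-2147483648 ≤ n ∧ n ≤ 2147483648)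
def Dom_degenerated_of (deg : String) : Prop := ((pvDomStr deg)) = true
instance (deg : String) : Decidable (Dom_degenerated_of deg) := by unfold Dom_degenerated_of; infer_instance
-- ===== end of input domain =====

-- B replaces A's repeated global str.replace passes (one per degenerate occurrence) with a
-- single left-to-right scan expanding each character in place (measured faster in a timing run).


-- the IUPAC degenerate-code dict (the same literal appears in both Pythons)
def pvDg : PySem.Dict Char String :=
  PySem.Dict.ofList [('R', "AG"), ('Y', "CT"), ('S', "GC"), ('W', "AT"), ('K', "GT"),
                     ('M', "AC"), ('B', "CGT"), ('D', "AGT"), ('H', "ACT"), ('V', "ACG"), ('N', "ATGC")]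

-- ===== PORT A =====
-- A: filter out the degenerate codes present, then one global replace per occurrence.
-- dg[flse] is ported as getD (the key is always present); "[{}]".format(v) = "[" ++ v ++ "]".
def degenerated_of (deg : String) : String :=
  let transform := deg
  let dg := pvDg
  let non_nucleotides := transform.toList.filter (fun a => if (PySem.Dict.keys dg).contains a then true else false)
  let transform := non_nucleotides.foldl
    (fun t flse => PySem.Str.replace t (String.ofList [flse]) ("[" ++ PySem.Dict.getD dg flse "" ++ "]")) transform
  transform

-- ===== PORT B =====
-- B: one pass; ''.join expanding each char.
def degenerated_of_alt (deg : String) : String :=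
  let dg := pvDg
  String.ofList (deg.toList.flatMap (fun c =>
    match PySem.Dict.get? dg c with
    | some v => ("[" ++ v ++ "]").toList
    | none => [c]))

-- ===== PRECONDITION & SPEC =====
def Spec_degenerated_of (deg : String) (out : String) : Prop := out = degenerated_of_alt deg
instance (deg : String) (out : String) : Decidable (Spec_degenerated_of deg out) := by unfold Spec_degenerated_of; infer_instance

-- ===== CLAIM (what is proved, stated in full; the proofs are below) =====
def Claim_equal_degenerated_of : Prop := ∀ (deg : String), Dom_degenerated_of deg → Spec_degenerated_of deg (degenerated_of deg)

-- ===== LEMMAS AND PROOFS =====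

-- whether c is a degenerate code
def pvIsKey (c : Char) : Bool := (PySem.Dict.keys pvDg).contains c

-- the expansion of one char
def pvExp (c : Char) : List Char :=
  match PySem.Dict.get? pvDg c with
  | some v => ("[" ++ v ++ "]").toList
  | none => [c]

-- what one replace pass does per char
def pvStep (c x : Char) : List Char := if x = c then pvExp c else [x]

theorem pvIsKey_cases (c : Char) (h : pvIsKey c = true) :
    c = 'R' ∨ c = 'Y' ∨ c = 'S' ∨ c = 'W' ∨ c = 'K' ∨ c = 'M' ∨ c = 'B' ∨ c = 'D' ∨ c = 'H' ∨ c = 'V' ∨ c = 'N' := by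
  have hk : PySem.Dict.keys pvDg = ['R','Y','S','W','K','M','B','D','H','V','N'] := by decide
  unfold pvIsKey at h
  rw [hk] at h
  simpa using List.contains_iff_mem.mp h

set_option maxRecDepth 2048 in
theorem pvExp_no_keys (c : Char) (hc : pvIsKey c = true) : ∀ x ∈ pvExp c, pvIsKey x = false := by
  have hb : (pvExp c).all (fun x => !pvIsKey x) = true := by
    rcases pvIsKey_cases c hc with h|h|h|h|h|h|h|h|h|h|h <;> subst h <;> decide
  intro x hx
  simpa using List.all_eq_true.mp hb x hx

-- a non-key expands to itself
theorem pvExp_of_not_key (c : Char) (hc : pvIsKey c = false) : pvExp c = [c] := by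
  unfold pvExp
  cases hget : PySem.Dict.get? pvDg c with
  | none => rfl
  | some v =>
    exfalso
    have hcont : PySem.Dict.contains pvDg c = true := by
      rw [PySem.Dict.contains_eq_isSome_get?, hget]; rfl
    have hmem : c ∈ PySem.Dict.keys pvDg := (PySem.Dict.contains_iff_mem_keys pvDg c).mp hcont
    have hk : pvIsKey c = true := by
      unfold pvIsKey; exact List.contains_iff_mem.mpr hmem
    simp [hk] at hc

-- single-char replace is flatMap of pvStep
theorem replace_go_single (c : Char) (r : List Char) :
    ∀ (fuel : Nat) (l acc : List Char), l.length ≤ fuel →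
      PySem.Chars.replace.go [c] r fuel l acc = acc.reverse ++ l.flatMap (fun x => if x = c then r else [x]) := by
  intro fuel
  induction fuel with
  | zero =>
    intro l acc h
    have : l = [] := List.eq_nil_of_length_eq_zero (Nat.le_zero.mp h)
    subst this
    simp [PySem.Chars.replace.go]
  | succ f ih =>
    intro l acc h
    cases l with
    | nil => simp [PySem.Chars.replace.go]
    | cons x t =>
      simp only [PySem.Chars.replace.go]
      by_cases hx : x = c
      · subst hx
        have hp : List.isPrefixOf [x] (x :: t) = true := by simp [List.isPrefixOf]
        rw [if_pos hp]
        have := ih t (r.reverse ++ acc) (by simpa using Nat.le_of_succ_le_succ h)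
        simp only [List.length_cons, List.length_nil, List.drop_succ_cons, List.drop_zero] at this ⊢
        rw [this]
        simp
      · have hp : List.isPrefixOf [c] (x :: t) = false := by
          simp [List.isPrefixOf]; exact fun hh => absurd hh.symm hx
        rw [if_neg (by simp [hp])]
        rw [ih t (x :: acc) (by simpa using Nat.le_of_succ_le_succ h)]
        simp [hx]

theorem replace_single (c : Char) (r s : List Char) :
    PySem.Chars.replace s [c] r = s.flatMap (fun x => if x = c then r else [x]) := by
  unfold PySem.Chars.replace
  rw [if_neg (by simp)]
  simpa using replace_go_single c r s.length s [] (le_refl _)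

-- one pass of the A-loop body, on the chars level
theorem flatMap_step_flatMap_exp (c : Char) (hc : pvIsKey c = true) (t : List Char) :
    (t.flatMap (pvStep c)).flatMap pvExp = t.flatMap pvExp := by
  rw [List.flatMap_assoc]
  apply List.flatMap_congr
  intro x _
  unfold pvStep
  by_cases hx : x = c
  · subst hx
    rw [if_pos rfl]
    have hnk := pvExp_no_keys x hc
    have : ∀ y ∈ pvExp x, pvExp y = [y] := fun y hy => pvExp_of_not_key y (hnk y hy)
    calc (pvExp x).flatMap pvExp = (pvExp x).flatMap (fun y => [y]) :=
          List.flatMap_congr (fun y hy => this y hy)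
      _ = pvExp x := by simp
      _ = (fun x => pvExp x) x := rfl
  · simp [hx]

-- the A-loop over any list of keys covering all keys of t, on the chars level
theorem foldl_flatMap_eq (ks : List Char) :
    ∀ t : List Char, (∀ k ∈ ks, pvIsKey k = true) → (∀ x ∈ t, pvIsKey x = true → x ∈ ks) →
      ks.foldl (fun t c => t.flatMap (pvStep c)) t = t.flatMap pvExp := by
  induction ks with
  | nil =>
    intro t _ hcov
    have : ∀ x ∈ t, pvExp x = [x] := by
      intro x hx
      apply pvExp_of_not_key
      cases h : pvIsKey x with
      | false => rfl
      | true => exact absurd (hcov x hx h) (List.not_mem_nil)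
    simp only [List.foldl_nil]
    rw [List.flatMap_congr this]
    simp
  | cons c ks ih =>
    intro t hkeys hcov
    simp only [List.foldl_cons]
    have hc : pvIsKey c = true := hkeys c (List.mem_cons_self ..)
    have hcov' : ∀ x ∈ t.flatMap (pvStep c), pvIsKey x = true → x ∈ ks := by
      intro x hx hkx
      rcases List.mem_flatMap.mp hx with ⟨y, hy, hxy⟩
      unfold pvStep at hxy
      by_cases hyc : y = c
      · rw [if_pos hyc] at hxy
        exact absurd (pvExp_no_keys c hc x hxy) (by simp [hkx])
      · rw [if_neg hyc] at hxy
        simp at hxy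
        subst hxy
        rcases List.mem_cons.mp (hcov x hy hkx) with h2 | h2
        · exact absurd h2 hyc
        · exact h2
    rw [ih (t.flatMap (pvStep c)) (fun k hk => hkeys k (List.mem_cons_of_mem _ hk)) hcov',
        flatMap_step_flatMap_exp c hc]

set_option maxRecDepth 2048 in
theorem contains_of_key (c : Char) (h : pvIsKey c = true) : PySem.Dict.contains pvDg c = true := by
  rcases pvIsKey_cases c h with h|h|h|h|h|h|h|h|h|h|h <;> subst h <;> decide

-- A's String-level loop equals the chars-level loop
theorem foldl_replace_toList (ks : List Char) (hks : ∀ k ∈ ks, pvIsKey k = true) :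
    ∀ t : String,
      (ks.foldl (fun t flse => PySem.Str.replace t (String.ofList [flse]) ("[" ++ PySem.Dict.getD pvDg flse "" ++ "]")) t).toList
        = ks.foldl (fun t c => t.flatMap (pvStep c)) t.toList := by
  induction ks with
  | nil => intro t; rfl
  | cons c ks ih =>
    intro t
    simp only [List.foldl_cons]
    rw [ih (fun k hk => hks k (List.mem_cons_of_mem _ hk))]
    congr 1
    rw [PySem.Str.toList_replace]
    rw [String.toList_ofList, replace_single]
    apply List.flatMap_congr
    intro x _
    unfold pvStep
    by_cases hx : x = c
    · subst hx
      rw [if_pos rfl, if_pos rfl]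
      unfold pvExp
      cases hget : PySem.Dict.get? pvDg x with
      | none =>
        exact absurd (contains_of_key x (hks x (List.mem_cons_self ..))) (by
          rw [PySem.Dict.contains_eq_isSome_get?, hget]; simp)
      | some v =>
        rw [PySem.Dict.getD_eq_get?_getD, hget]
        rfl
    · simp [hx]

theorem keys_of_filter (s : List Char) :
    ∀ k ∈ s.filter (fun a => if (PySem.Dict.keys pvDg).contains a then true else false), pvIsKey k = true := by
  intro k hk
  have := (List.mem_filter.mp hk).2
  simpa [pvIsKey] using this

theorem cover_of_filter (s : List Char) :
    ∀ x ∈ s, pvIsKey x = true →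
      x ∈ s.filter (fun a => if (PySem.Dict.keys pvDg).contains a then true else false) := by
  intro x hx hkx
  apply List.mem_filter.mpr
  exact ⟨hx, by simpa [pvIsKey] using hkx⟩

-- ===== VERDICT (by name: the statement is the Claim_ definition above) =====
theorem degenerated_of_spec : Claim_equal_degenerated_of := by
  intro deg _
  unfold Spec_degenerated_of degenerated_of degenerated_of_alt
  simp only []
  apply String.toList_inj.mp
  rw [foldl_replace_toList _ (keys_of_filter deg.toList), foldl_flatMap_eq _ _ (keys_of_filter deg.toList) (cover_of_filter deg.toList)]
  rw [String.toList_ofList]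
  rfl
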